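-- pv_equiv track=rewrite | github.com/enricofacca/enricofacca.github.io | extract_info.py | parse_nested_braces
-- ===== SOURCE A (Python) =====
-- def parse_nested_braces(text, start_index):
--     """
--     Parses a balanced brace structure starting at start_index.
--     Returns the content inside the braces and the index after the closing brace.
--     """
--     if start_index >= len(text) or text[start_index] != '{':
--         return None, start_index
--
--     balance = 1
--     i = start_index + 1
--     content_start = i
--
--     while i < len(text) and balance > 0:
--         if text[i] == '{':
--             balance += 1
--         elif text[i] == '}':
--             balance -= 1
--         i += 1
--
--     if balance == 0:
--         return text[content_start:i-1], i
--     else: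
--         return None, start_index
-- ===== SOURCE B (Python) =====
-- def parse_nested_braces(text, start_index):
--     """
--     Alternative implementation: one global pass pairs every '{' with its
--     matching '}' (stack of open positions -> match map), then the answer
--     for start_index is a single dict lookup.
--     """
--     if start_index < 0 or start_index >= len(text) or text[start_index] != '{':
--         return None, start_index
--     match = {}
--     stack = []
--     for i, c in enumerate(text):
--         if c == '{':
--             stack.append(i)
--         elif c == '}' and stack:
--             match[stack.pop()] = i
--     j = match.get(start_index)
--     if j is None:
--         return None, start_index
--     return text[start_index + 1:j], j + 1
-- ===== Notes on version B (the rewrite author's own statement) =====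
-- stated objective: alternative
-- what changed: A scans forward from start_index with a balance counter; B makes one global pass over the whole text pairing every '{' with its matching '}' via a stack of open positions into a match map, then answers with a single dict lookup.
-- intended difference: On in-range negative start_index where Python's wraparound makes text[start_index] == '{' and the wrapped scan region reaches a matching close, A returns an accidental wraparound slice; B returns None with the unchanged start_index, the intended out-of-range answer for an index-based parser. — e.g. on parse_nested_braces("{}", -2): A returns (some "", 0), B returns (none, -2)
import Mathlib
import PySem

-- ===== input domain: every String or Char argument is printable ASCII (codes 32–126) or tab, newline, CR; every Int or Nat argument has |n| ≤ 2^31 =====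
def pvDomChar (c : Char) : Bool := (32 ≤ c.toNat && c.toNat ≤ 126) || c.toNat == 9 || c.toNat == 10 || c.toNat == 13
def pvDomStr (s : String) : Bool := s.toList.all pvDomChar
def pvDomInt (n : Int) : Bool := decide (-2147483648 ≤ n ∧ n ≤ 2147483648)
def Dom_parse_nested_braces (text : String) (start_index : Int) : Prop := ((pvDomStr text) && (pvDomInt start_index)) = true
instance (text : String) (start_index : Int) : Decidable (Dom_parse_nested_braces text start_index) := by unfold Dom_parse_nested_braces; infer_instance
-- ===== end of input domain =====

-- B replaces A's forward balance-counter scan by one global pass that pairs every brace into a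
-- match map and a final dict lookup (alternative algorithm, same cost class); no argument is mutated.

-- ===== PORT A =====
-- A's while loop: i, balance exactly as in the Python; text[i] via pyGet? (Python index semantics)
def pvA_loop (cs : List Char) (i : Int) (balance : Int) : Int × Int :=
  if _h : i < (cs.length : Int) ∧ 0 < balance then
    match PySem.List.pyGet? cs i with
    | none => (i, balance)
    | some c =>
      pvA_loop cs (i + 1) (if c = '{' then balance + 1 else if c = '}' then balance - 1 else balance)
  else (i, balance)
termination_by ((cs.length : Int) - i).toNat
decreasing_by omega

def parse_nested_braces (text : String) (start_index : Int) : Option String × Int :=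
  if start_index ≥ (text.toList.length : Int) then (none, start_index)
  else
    match PySem.List.pyGet? text.toList start_index with
    | none => (none, start_index)  -- Python raises IndexError here (start_index < -len); outside Pre_
    | some c =>
      if c ≠ '{' then (none, start_index)
      else
        let res := pvA_loop text.toList (start_index + 1) 1
        if res.2 = 0 then
          (some (PySem.Str.slice text (some (start_index + 1)) (some (res.1 - 1))), res.1)
        else (none, start_index)

-- ===== PORT B =====
-- Source B's 'for i, c in enumerate(text)' maintaining (match, stack), as structural recursion
def pvB_loop (l : List Char) (i : Int) (m : PySem.Dict Int Int) (stk : List Int) :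
    PySem.Dict Int Int × List Int :=
  match l with
  | [] => (m, stk)
  | c :: t =>
    if c = '{' then pvB_loop t (i + 1) m (i :: stk)
    else if c = '}' then
      match stk with
      | [] => pvB_loop t (i + 1) m stk
      | top :: rest => pvB_loop t (i + 1) (m.insert top i) rest
    else pvB_loop t (i + 1) m stk

def parse_nested_braces_alt (text : String) (start_index : Int) : Option String × Int :=
  if start_index < 0 ∨ start_index ≥ (text.toList.length : Int) then (none, start_index)
  else
    match PySem.List.pyGet? text.toList start_index with
    | none => (none, start_index)  -- unreachable: 0 ≤ start_index < len
    | some c =>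
      if c ≠ '{' then (none, start_index)
      else
        match (pvB_loop text.toList 0 PySem.Dict.empty []).1.get? start_index with
        | none => (none, start_index)
        | some j => (some (PySem.Str.slice text (some (start_index + 1)) (some j)), j + 1)

-- ===== PRECONDITION & SPEC =====
-- Pre_ excludes only start_index < -len(text), where A raises IndexError on text[start_index].
def Pre_parse_nested_braces (text : String) (start_index : Int) : Prop :=
  -(text.toList.length : Int) ≤ start_index
instance (text : String) (start_index : Int) : Decidable (Pre_parse_nested_braces text start_index) := by
  unfold Pre_parse_nested_braces; infer_instance
def pvWitness_parse_nested_braces : String × Int := ("{a}", 0)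

-- On in-range negative start_index where Python's wraparound makes text[start_index] == '{' and the
-- wrapped scan region (the text's tail after that position followed by the whole text) reaches a
-- matching close (some prefix has exactly one more '}' than '{'), A returns an accidental wraparound
-- slice; B returns None with the unchanged start_index, the intended out-of-range answer.
def pvWrap (text : String) (start_index : Int) : List Char :=
  text.toList.drop ((text.toList.length : Int) + start_index + 1).toNat ++ text.toList

def D_parse_nested_braces (text : String) (start_index : Int) : Prop :=
  start_index < 0 ∧ PySem.Str.pyGet? text start_index = some '{' ∧
  ∃ k ∈ List.range ((pvWrap text start_index).length + 1),
    ((pvWrap text start_index).take k).count '}' = ((pvWrap text start_index).take k).count '{' + 1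
instance (text : String) (start_index : Int) : Decidable (D_parse_nested_braces text start_index) := by
  unfold D_parse_nested_braces; infer_instance

def Spec_parse_nested_braces (text : String) (start_index : Int) (out : Option String × Int) : Prop :=
  ¬ D_parse_nested_braces text start_index → out = parse_nested_braces_alt text start_index
instance (text : String) (start_index : Int) (out : Option String × Int) : Decidable (Spec_parse_nested_braces text start_index out) := by
  unfold Spec_parse_nested_braces; infer_instance

def pvDiffWitness_parse_nested_braces : String × Int := ("{}", -2)
def pvDiffWitnessOut_parse_nested_braces : (Option String × Int) × (Option String × Int) :=
  ((some "", 0), (none, -2))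

-- ===== CLAIM (what is proved, stated in full; the proofs are below) =====
def Claim_unchanged_parse_nested_braces : Prop := ∀ (text : String) (start_index : Int), Dom_parse_nested_braces text start_index → Pre_parse_nested_braces text start_index → Spec_parse_nested_braces text start_index (parse_nested_braces text start_index)
def Claim_changed_parse_nested_braces : Prop := Dom_parse_nested_braces (pvDiffWitness_parse_nested_braces.1) (pvDiffWitness_parse_nested_braces.2) ∧ Pre_parse_nested_braces (pvDiffWitness_parse_nested_braces.1) (pvDiffWitness_parse_nested_braces.2) ∧ D_parse_nested_braces (pvDiffWitness_parse_nested_braces.1) (pvDiffWitness_parse_nested_braces.2) ∧ parse_nested_braces (pvDiffWitness_parse_nested_braces.1) (pvDiffWitness_parse_nested_braces.2) = pvDiffWitnessOut_parse_nested_braces.1 ∧ parse_nested_braces_alt (pvDiffWitness_parse_nested_braces.1) (pvDiffWitness_parse_nested_braces.2) = pvDiffWitnessOut_parse_nested_braces.2 ∧ pvDiffWitnessOut_parse_nested_braces.1 ≠ pvDiffWitnessOut_parse_nested_braces.2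
def Claim_exact_parse_nested_braces : Prop := ∀ (text : String) (start_index : Int), Dom_parse_nested_braces text start_index → Pre_parse_nested_braces text start_index → D_parse_nested_braces text start_index → parse_nested_braces text start_index ≠ parse_nested_braces_alt text start_index

-- ===== LEMMAS AND PROOFS =====

-- reference scan: (chars consumed, final balance) of A's counter loop over a char stream
def pvScan : List Char → Int → Nat × Int
  | [], b => (0, b)
  | c :: t, b =>
    if 0 < b then
      let r := pvScan t (if c = '{' then b + 1 else if c = '}' then b - 1 else b)
      (r.1 + 1, r.2)
    else (0, b)

-- the stream of characters A's loop reads from index i on (negative i wraps, then reads cs from 0)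
def pvWindow (cs : List Char) (i : Int) : List Char :=
  if i < 0 then cs.drop ((cs.length : Int) + i).toNat ++ cs else cs.drop i.toNat

lemma pvScan_nonpos (u : List Char) (b : Int) (hb : ¬ 0 < b) : pvScan u b = (0, b) := by
  cases u <;> simp [pvScan, hb]

lemma pvWindow_cons (cs : List Char) (i : Int) (hlo : -(cs.length : Int) ≤ i)
    (hhi : i < (cs.length : Int)) (c : Char) (hc : PySem.List.pyGet? cs i = some c) :
    pvWindow cs i = c :: pvWindow cs (i + 1) := by
  unfold pvWindow
  by_cases hneg : i < 0
  · have h1 : ((cs.length : Int) + i).toNat < cs.length := by omega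
    have hk : PySem.List.pyIdx? cs.length i = some (cs.length - (-i).toNat) := by
      simp [PySem.List.pyIdx?, show ¬ (0:Int) ≤ i by omega, hlo]
    have hidx : cs.length - (-i).toNat = ((cs.length : Int) + i).toNat := by omega
    rw [PySem.List.pyGet?, hk, hidx] at hc
    simp only [Option.bind] at hc
    have hcv : cs[((cs.length : Int) + i).toNat] = c := by
      simpa [List.getElem?_eq_getElem h1] using hc
    rw [if_pos hneg, List.drop_eq_getElem_cons h1, hcv]
    by_cases h2 : i + 1 < 0
    · rw [if_pos h2]
      have h3 : ((cs.length : Int) + (i + 1)).toNat = ((cs.length : Int) + i).toNat + 1 := by omega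
      rw [h3]; simp
    · rw [if_neg h2]
      have h3 : ((cs.length : Int) + i).toNat + 1 = cs.length := by omega
      rw [h3]
      simp [show (i + 1).toNat = 0 by omega]
  · have h0 : 0 ≤ i := by omega
    rw [PySem.List.pyGet?_of_nonneg _ h0] at hc
    have h1 : i.toNat < cs.length := by omega
    have hcv : cs[i.toNat] = c := by simpa [List.getElem?_eq_getElem h1] using hc
    simp only [if_neg hneg, if_neg (show ¬ i + 1 < 0 by omega)]
    rw [List.drop_eq_getElem_cons h1, hcv]
    have : (i + 1).toNat = i.toNat + 1 := by omega
    rw [this]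

lemma pvA_bridge (cs : List Char) (i b : Int) (hlo : -(cs.length : Int) ≤ i) :
    pvA_loop cs i b = (i + ((pvScan (pvWindow cs i) b).1 : Int), (pvScan (pvWindow cs i) b).2) := by
  fun_induction pvA_loop cs i b with
  | case1 i b h hc =>
    exfalso
    rw [PySem.List.pyGet?_eq_none_iff] at hc
    exact hc (by unfold PySem.Raise.InRange; omega)
  | case2 i b h c hc ih =>
    rw [pvWindow_cons cs i hlo h.1 c hc]
    simp only [dite_eq_ite] at ih
    rw [ih (by omega)]
    simp [pvScan, h.2]
    omega
  | case3 i b h =>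
    by_cases hb : 0 < b
    · have hi : (cs.length : Int) ≤ i := by omega
      have : pvWindow cs i = [] := by
        unfold pvWindow
        rw [if_neg (by omega)]
        simp; omega
      simp [this, pvScan]
    · rw [pvScan_nonpos _ _ hb]
      simp

lemma pvScan_zero_iff (u : List Char) (b : Int) (hb : 0 < b) :
    (pvScan u b).2 = 0 ↔ ∃ k ∈ List.range (u.length + 1),
      ((u.take k).count '}' : Int) = ((u.take k).count '{' : Int) + b := by
  induction u generalizing b with
  | nil =>
    simp [pvScan]
    omega
  | cons c t ih =>
    simp only [pvScan, if_pos hb]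
    rw [show ((pvScan t (if c = '{' then b + 1 else if c = '}' then b - 1 else b)).1 + 1,
          (pvScan t (if c = '{' then b + 1 else if c = '}' then b - 1 else b)).2).2
        = (pvScan t (if c = '{' then b + 1 else if c = '}' then b - 1 else b)).2 from rfl]
    by_cases h1 : c = '{'
    · subst h1
      rw [show (if ('{' : Char) = '{' then b + 1 else if ('{' : Char) = '}' then b - 1 else b) = b + 1
          by rw [if_pos rfl]]
      rw [ih _ (by omega)]
      simp only [List.mem_range, List.length_cons]
      constructor
      · rintro ⟨k, hk, he⟩
        refine ⟨k + 1, by omega, ?_⟩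
        simp only [List.take_succ_cons, List.count_cons]
        simp only [show (('{' : Char) == '}') = false by decide, show (('{' : Char) == '{') = true by decide]
        push_cast at he ⊢; omega
      · rintro ⟨k, hk, he⟩
        match k with
        | 0 => simp at he; omega
        | k + 1 =>
          refine ⟨k, by omega, ?_⟩
          simp only [List.take_succ_cons, List.count_cons] at he
          simp only [show (('{' : Char) == '}') = false by decide, show (('{' : Char) == '{') = true by decide] at he
          push_cast at he ⊢; omega
    · by_cases h2 : c = '}'
      · subst h2
        rw [show (if ('}' : Char) = '{' then b + 1 else if ('}' : Char) = '}' then b - 1 else b) = b - 1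
            by rw [if_neg (by decide), if_pos rfl]]
        by_cases hb1 : b = 1
        · subst hb1
          rw [show (1:Int) - 1 = 0 by norm_num, pvScan_nonpos t 0 (by norm_num)]
          simp only [List.mem_range]
          constructor
          · intro _
            exact ⟨1, by simp, by simp⟩
          · intro _; trivial
        · rw [ih _ (by omega)]
          simp only [List.mem_range, List.length_cons]
          constructor
          · rintro ⟨k, hk, he⟩
            refine ⟨k + 1, by omega, ?_⟩
            simp only [List.take_succ_cons, List.count_cons]
            simp only [show (('}' : Char) == '}') = true by decide, show (('}' : Char) == '{') = false by decide]
            push_cast at he ⊢; omega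
          · rintro ⟨k, hk, he⟩
            match k with
            | 0 => simp at he; omega
            | k + 1 =>
              refine ⟨k, by omega, ?_⟩
              simp only [List.take_succ_cons, List.count_cons] at he
              simp only [show (('}' : Char) == '}') = true by decide, show (('}' : Char) == '{') = false by decide] at he
              push_cast at he ⊢; omega
      · rw [show (if c = '{' then b + 1 else if c = '}' then b - 1 else b) = b
            by rw [if_neg h1, if_neg h2]]
        rw [ih _ hb]
        simp only [List.mem_range, List.length_cons]
        constructor
        · rintro ⟨k, hk, he⟩
          refine ⟨k + 1, by omega, ?_⟩
          simp only [List.take_succ_cons, List.count_cons]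
          simp only [show (c == '}') = false by simp [h2], show (c == '{') = false by simp [h1]]
          push_cast at he ⊢; omega
        · rintro ⟨k, hk, he⟩
          match k with
          | 0 => simp at he; omega
          | k + 1 =>
            refine ⟨k, by omega, ?_⟩
            simp only [List.take_succ_cons, List.count_cons] at he
            simp only [show (c == '}') = false by simp [h2], show (c == '{') = false by simp [h1]] at he
            push_cast at he ⊢; omega

lemma pvB_stable (u : List Char) (i : Int) (m : PySem.Dict Int Int) (stk : List Int) (s : Int)
    (hi : s < i) (hstk : ∀ x ∈ stk, x ≠ s) :
    (pvB_loop u i m stk).1.get? s = m.get? s := by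
  induction u generalizing i m stk with
  | nil => rfl
  | cons c t ih =>
    simp only [pvB_loop]
    split_ifs with h1 h2
    · exact ih (i+1) m (i :: stk) (by omega)
        (by intro x hx; rcases List.mem_cons.mp hx with rfl | hx; exacts [by omega, hstk x hx])
    · match stk, hstk with
      | [], _ => exact ih (i+1) m [] (by omega) (by simp)
      | top :: rest, hstk =>
        rw [ih (i+1) _ rest (by omega) (fun x hx => hstk x (List.mem_cons_of_mem _ hx))]
        exact PySem.Dict.get?_insert_of_ne m i (Ne.symm (hstk top (by simp)))
    · exact ih (i+1) m stk (by omega) hstk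

lemma pvB_prefix (u : List Char) (i : Int) (m : PySem.Dict Int Int) (stk : List Int) (s : Int)
    (hs : i + (u.length : Int) ≤ s) (hm : m.get? s = none) (hstk : ∀ x ∈ stk, x < i) :
    (pvB_loop u i m stk).1.get? s = none ∧ ∀ x ∈ (pvB_loop u i m stk).2, x < i + (u.length : Int) := by
  induction u generalizing i m stk with
  | nil => exact ⟨hm, by simpa using hstk⟩
  | cons c t ih =>
    simp only [pvB_loop, List.length_cons]
    have harith : ∀ (j : Int), i + 1 + (t.length : Int) = i + ((t.length : Int) + 1) := by
      intro _; ring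
    split_ifs with h1 h2
    · have := ih (i+1) m (i :: stk) (by simp only [List.length_cons] at hs; push_cast at hs ⊢; omega) hm
        (by intro x hx; rcases List.mem_cons.mp hx with rfl | hx; exacts [by omega, lt_trans (hstk x hx) (by omega)])
      rw [harith 0] at this; exact this
    · match stk, hstk with
      | [], hstk =>
        have := ih (i+1) m [] (by simp only [List.length_cons] at hs; push_cast at hs ⊢; omega) hm (by simp)
        rw [harith 0] at this; exact this
      | top :: rest, hstk =>
        have hmn : (m.insert top i).get? s = none := by
          rw [PySem.Dict.get?_insert_of_ne m i (by have := hstk top (by simp); omega)]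
          exact hm
        have := ih (i+1) _ rest (by simp only [List.length_cons] at hs; push_cast at hs ⊢; omega) hmn
          (fun x hx => lt_trans (hstk x (List.mem_cons_of_mem _ hx)) (by omega))
        rw [harith 0] at this; exact this
    · have := ih (i+1) m stk (by simp only [List.length_cons] at hs; push_cast at hs ⊢; omega) hm
        (fun x hx => lt_trans (hstk x hx) (by omega))
      rw [harith 0] at this; exact this

lemma pvB_key (u : List Char) (i : Int) (m : PySem.Dict Int Int) (above below : List Int) (s : Int)
    (hm : m.get? s = none) (hi : s < i) (ha : ∀ x ∈ above, x ≠ s) (hb : ∀ x ∈ below, x ≠ s) :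
    (pvB_loop u i m (above ++ s :: below)).1.get? s =
      (if (pvScan u ((above.length : Int) + 1)).2 = 0
       then some (i + ((pvScan u ((above.length : Int) + 1)).1 : Int) - 1) else none) := by
  induction u generalizing i m above with
  | nil =>
    rw [if_neg (by simp [pvScan]; omega)]
    exact hm
  | cons c t ih =>
    have hpos : (0 : Int) < (above.length : Int) + 1 := by positivity
    simp only [pvB_loop, pvScan, if_pos hpos]
    by_cases h1 : c = '{'
    · rw [if_pos h1, show i :: (above ++ s :: below) = (i :: above) ++ s :: below from rfl]
      rw [if_pos h1]
      have hih := ih (i + 1) m (i :: above) hm (by omega)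
        (by intro x hx; rcases List.mem_cons.mp hx with rfl | hx; exacts [by omega, ha x hx])
      rw [show (((i :: above).length : Int) + 1) = ((above.length : Int) + 1 + 1) by push_cast [List.length_cons]; omega] at hih
      rw [hih]
      by_cases hz : (pvScan t ((above.length : Int) + 1 + 1)).2 = 0
      · rw [if_pos hz, if_pos hz]
        congr 1
        omega
      · rw [if_neg hz, if_neg hz]
    · rw [if_neg h1]
      by_cases h2 : c = '}'
      · rw [if_pos h2, if_neg h1, if_pos h2]
        match above, ha with
        | [], _ =>
          simp only [List.nil_append, List.length_nil, Nat.cast_zero, zero_add]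
          rw [pvB_stable t (i + 1) _ below s (by omega) hb]
          rw [PySem.Dict.get?_insert_self]
          rw [show (1 : Int) - 1 = 0 by norm_num, pvScan_nonpos t 0 (by norm_num)]
          norm_num
        | a :: as, ha =>
          simp only [List.cons_append]
          have hih := ih (i + 1) (m.insert a i) as
            (by rw [PySem.Dict.get?_insert_of_ne m i (Ne.symm (ha a (by simp)))]; exact hm)
            (by omega)
            (fun x hx => ha x (List.mem_cons_of_mem _ hx))
          rw [hih]
          rw [show (((a :: as).length : Int) + 1 - 1) = ((as.length : Int) + 1) by push_cast [List.length_cons]; omega]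
          by_cases hz : (pvScan t ((as.length : Int) + 1)).2 = 0
          · rw [if_pos hz, if_pos hz]
            congr 1
            omega
          · rw [if_neg hz, if_neg hz]
      · rw [if_neg h2, if_neg h1, if_neg h2]
        have hih := ih (i + 1) m above hm (by omega) ha
        rw [hih]
        by_cases hz : (pvScan t ((above.length : Int) + 1)).2 = 0
        · rw [if_pos hz, if_pos hz]
          congr 1
          omega
        · rw [if_neg hz, if_neg hz]

lemma pvB_append (u v : List Char) (i : Int) (m : PySem.Dict Int Int) (stk : List Int) :
    pvB_loop (u ++ v) i m stk =
      pvB_loop v (i + (u.length : Int)) (pvB_loop u i m stk).1 (pvB_loop u i m stk).2 := by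
  induction u generalizing i m stk with
  | nil => simp [pvB_loop]
  | cons c t ih =>
    have harith : i + 1 + (t.length : Int) = i + ((t.length : Int) + 1) := by ring
    by_cases h1 : c = '{'
    · simp only [List.cons_append, pvB_loop, if_pos h1, List.length_cons]
      rw [ih, harith]; norm_cast
    · by_cases h2 : c = '}'
      · match stk with
        | [] =>
          simp only [List.cons_append, pvB_loop, if_neg h1, if_pos h2, List.length_cons]
          rw [ih, harith]; norm_cast
        | top :: rest =>
          simp only [List.cons_append, pvB_loop, if_neg h1, if_pos h2, List.length_cons]
          rw [ih, harith]; norm_cast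
      · simp only [List.cons_append, pvB_loop, if_neg h1, if_neg h2, List.length_cons]
        rw [ih, harith]; norm_cast

lemma pvB_get (cs : List Char) (s : Nat) (hs : s < cs.length) (hc : cs[s] = '{') :
    (pvB_loop cs 0 PySem.Dict.empty []).1.get? (s : Int) =
      (if (pvScan (cs.drop (s + 1)) 1).2 = 0
       then some ((s : Int) + 1 + ((pvScan (cs.drop (s + 1)) 1).1 : Int) - 1) else none) := by
  have hsplit : cs = cs.take s ++ cs[s] :: cs.drop (s + 1) := by
    conv_lhs => rw [← List.take_append_drop s cs]
    rw [List.drop_eq_getElem_cons hs]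
  conv_lhs => rw [hsplit]
  rw [pvB_append]
  have hlen : (((cs.take s).length : Nat) : Int) = (s : Int) := by
    simp [List.length_take]; omega
  have hpre := pvB_prefix (cs.take s) 0 PySem.Dict.empty [] (s : Int)
    (by rw [hlen]; omega) (PySem.Dict.get?_empty _) (by simp)
  obtain ⟨hm0, hstk0⟩ := hpre
  rw [hc]
  simp only [pvB_loop, if_true]
  simp only [zero_add, hlen]
  have hbelow : ∀ x ∈ (pvB_loop (cs.take s) 0 PySem.Dict.empty []).2, x ≠ (s : Int) := by
    intro x hx
    have := hstk0 x hx
    rw [zero_add, hlen] at this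
    omega
  have hkey := pvB_key (cs.drop (s + 1)) ((s : Int) + 1)
    (pvB_loop (cs.take s) 0 PySem.Dict.empty []).1
    [] (pvB_loop (cs.take s) 0 PySem.Dict.empty []).2 (s : Int)
    hm0 (by omega) (by simp) hbelow
  simp only [List.nil_append, List.length_nil, Nat.cast_zero, zero_add] at hkey
  rw [hkey]

-- for in-range negative s, the stream A reads from s+1 is the region D_ talks about
lemma pvWindow_neg (cs : List Char) (s : Int) (h1 : -(cs.length : Int) ≤ s) (h2 : s < 0) :
    pvWindow cs (s + 1) = cs.drop ((cs.length : Int) + s + 1).toNat ++ cs := by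
  unfold pvWindow
  by_cases h : s + 1 < 0
  · rw [if_pos h]
    congr 2
    omega
  · rw [if_neg h]
    have hs1 : s = -1 := by omega
    subst hs1
    rw [show ((cs.length : Int) + -1 + 1).toNat = cs.length by omega]
    simp

-- ===== VERDICT (by name: the statement is the Claim_ definition above) =====
theorem parse_nested_braces_spec : Claim_unchanged_parse_nested_braces := by
  intro text s _ hpre hnd
  unfold Pre_parse_nested_braces at hpre
  unfold parse_nested_braces parse_nested_braces_alt
  by_cases hge : s ≥ (text.toList.length : Int)
  · rw [if_pos hge, if_pos (Or.inr hge)]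
  · obtain ⟨c, hc⟩ : ∃ c, PySem.List.pyGet? text.toList s = some c := by
      cases h : PySem.List.pyGet? text.toList s with
      | none =>
        rw [PySem.List.pyGet?_eq_none_iff] at h
        exact absurd (by unfold PySem.Raise.InRange; omega) h
      | some c => exact ⟨c, rfl⟩
    by_cases hs0 : s < 0
    · rw [if_pos (Or.inl hs0), if_neg hge]
      simp only [hc]
      by_cases hbrace : c = '{'
      · subst hbrace
        rw [if_neg (show ¬(('{' : Char) ≠ '{') by decide)]
        have hwin := pvWindow_neg text.toList s hpre hs0
        have hb := pvA_bridge text.toList (s + 1) 1 (by omega)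
        rw [hb]
        rw [if_neg ?_]
        rw [hwin, pvScan_zero_iff _ 1 (by norm_num)]
        intro hex
        obtain ⟨k, hk, he⟩ := hex
        refine hnd ⟨hs0, by simpa using hc, k, ?_, by exact_mod_cast he⟩
        simpa [pvWrap] using hk
      · rw [if_pos hbrace]
    · rw [if_neg (show ¬(s < 0 ∨ s ≥ (text.toList.length : Int)) by omega)]
      rw [if_neg hge]
      simp only [hc]
      by_cases hbrace : c = '{'
      · subst hbrace
        rw [if_neg (show ¬(('{' : Char) ≠ '{') by decide), if_neg (show ¬(('{' : Char) ≠ '{') by decide)]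
        have hs0' : (0 : Int) ≤ s := by omega
        have hcg : text.toList[s.toNat] = '{' := by
          rw [PySem.List.pyGet?_eq_some_getElem _ hs0' (by omega)] at hc
          exact Option.some.inj hc
        have hb := pvA_bridge text.toList (s + 1) 1 (by omega)
        have hwin : pvWindow text.toList (s + 1) = text.toList.drop (s.toNat + 1) := by
          unfold pvWindow
          rw [if_neg (by omega), show (s + 1).toNat = s.toNat + 1 by omega]
        have hg := pvB_get text.toList s.toNat (by omega) hcg
        rw [Int.toNat_of_nonneg hs0'] at hg
        rw [hb, hwin, hg]
        by_cases hz : (pvScan (text.toList.drop (s.toNat + 1)) 1).2 = 0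
        · rw [if_pos hz, if_pos hz]
          simp only [Prod.mk.injEq]
          exact ⟨by trivial, by omega⟩
        · rw [if_neg hz, if_neg hz]
      · rw [if_pos hbrace, if_pos hbrace]

theorem parse_nested_braces_changed : Claim_changed_parse_nested_braces := by
  unfold Claim_changed_parse_nested_braces
  refine ⟨by decide, by decide, by decide, ?_, by decide, by decide⟩
  show parse_nested_braces "{}" (-2) = (some "", 0)
  have h1 : pvA_loop "{}".toList (-1) 1 = (0, 0) := by
    rw [pvA_bridge "{}".toList (-1) 1 (by decide)]
    decide
  unfold parse_nested_braces
  rw [show (-2 + 1 : Int) = -1 by norm_num]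
  simp only [h1]
  decide

theorem parse_nested_braces_tight : Claim_exact_parse_nested_braces := by
  intro text s _ hpre hD
  obtain ⟨hs0, hcs, hex⟩ := hD
  unfold Pre_parse_nested_braces at hpre
  have hc : PySem.List.pyGet? text.toList s = some '{' := by simpa using hcs
  unfold parse_nested_braces parse_nested_braces_alt
  rw [if_neg (show ¬ s ≥ (text.toList.length : Int) by omega), if_pos (Or.inl hs0)]
  simp only [hc]
  rw [if_neg (show ¬(('{' : Char) ≠ '{') by decide)]
  have hb := pvA_bridge text.toList (s + 1) 1 (by omega)
  rw [hb]
  have hz : (pvScan (pvWindow text.toList (s + 1)) 1).2 = 0 := by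
    rw [pvWindow_neg text.toList s hpre hs0, pvScan_zero_iff _ 1 (by norm_num)]
    obtain ⟨k, hk, he⟩ := hex
    refine ⟨k, by simpa [pvWrap] using hk, by exact_mod_cast he⟩
  rw [if_pos hz]
  intro heq
  have h1 := congrArg Prod.fst heq
  simp at h1
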